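-- pv_equiv track=rewrite | github.com/gr0grig/void_re | parser/compile.py | find_stmt_semicolon
-- ===== SOURCE A (Python) =====
-- def find_stmt_semicolon(s):
--     """Find the statement-ending semicolon (not inside strings)."""
--     in_str = False
--     escape = False
--     for i, c in enumerate(s):
--         if escape:
--             escape = False
--             continue
--         if c == '\\' and in_str:
--             escape = True
--             continue
--         if c == '"':
--             in_str = not in_str
--             continue
--         if c == ';' and not in_str:
--             return i
--     return -1
-- ===== SOURCE B (Python) =====
-- def find_stmt_semicolon(s):
--     """Find the statement-ending semicolon (not inside strings)."""
--     i = 0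
--     n = len(s)
--     while i < n:
--         c = s[i]
--         if c == ';':
--             return i
--         if c == '"':
--             i += 1
--             while i < n and s[i] != '"':
--                 i += 2 if s[i] == '\\' else 1
--             i += 1
--         else:
--             i += 1
--     return -1
-- ===== Notes on version B (the rewrite author's own statement) =====
-- stated objective: alternative
-- what changed: Replaced the per-character in_str/escape boolean state machine with an index-jumping scan: the outer loop only looks for a semicolon or an opening quote, and a dedicated inner skip consumes a whole string literal at once (advancing by 2 over escapes), so no boolean flags are carried.
import Mathlib
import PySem

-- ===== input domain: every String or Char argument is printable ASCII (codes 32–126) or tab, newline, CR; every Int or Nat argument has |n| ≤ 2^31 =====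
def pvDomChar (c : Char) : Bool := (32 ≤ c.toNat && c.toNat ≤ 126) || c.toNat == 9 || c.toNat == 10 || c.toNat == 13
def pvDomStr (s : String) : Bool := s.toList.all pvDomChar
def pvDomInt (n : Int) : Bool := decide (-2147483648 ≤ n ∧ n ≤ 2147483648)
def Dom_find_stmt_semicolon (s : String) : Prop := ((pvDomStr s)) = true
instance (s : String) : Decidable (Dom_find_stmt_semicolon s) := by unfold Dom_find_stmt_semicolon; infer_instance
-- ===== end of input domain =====

-- B replaces A's per-character in_str/escape flag machine with an index-jumping scan
-- (an inner helper consumes a whole string literal at once); alternative structure, same cost.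

-- ===== PORT A =====
-- literal transliteration of A's enumerate loop with state (in_str, escape)
def pvFindA : List Char → Int → Bool → Bool → Int
  | [], _, _, _ => -1
  | c :: rest, i, instr, esc =>
    if esc then pvFindA rest (i + 1) instr false
    else if c = '\\' ∧ instr then pvFindA rest (i + 1) instr true
    else if c = '"' then pvFindA rest (i + 1) (!instr) false
    else if c = ';' ∧ ¬ instr = true then i
    else pvFindA rest (i + 1) instr false

def find_stmt_semicolon (s : String) : Int := pvFindA s.toList 0 false false

-- ===== PORT B =====
-- inner while of Source B: skip the rest of a string literal (backslash jumps 2);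
-- returns the remaining characters after the closing quote and the new index
def pvSkipStr : List Char → Int → List Char × Int
  | [], i => ([], i + 1)
  | c :: rest, i =>
    if c = '"' then (rest, i + 1)
    else if c = '\\' then pvSkipStr rest.tail (i + 2)
    else pvSkipStr rest (i + 1)
termination_by l _ => l.length
decreasing_by
  · simp [List.length_tail]
  · simp

theorem pvSkipStr_len : ∀ (l : List Char) (i : Int), (pvSkipStr l i).1.length ≤ l.length
  | [], _ => by simp [pvSkipStr]
  | c :: rest, i => by
    unfold pvSkipStr
    split_ifs
    · simp
    · calc (pvSkipStr rest.tail (i + 2)).1.length ≤ rest.tail.length := pvSkipStr_len _ _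
        _ ≤ (c :: rest).length := by simp [List.length_tail]; omega
    · exact Nat.le_trans (pvSkipStr_len rest _) (Nat.le_succ _)
termination_by l _ => l.length
decreasing_by
  · simp [List.length_tail]
  · simp

-- outer while of Source B
def pvFindB : List Char → Int → Int
  | [], _ => -1
  | c :: rest, i =>
    if c = ';' then i
    else if c = '"' then pvFindB (pvSkipStr rest (i + 1)).1 (pvSkipStr rest (i + 1)).2
    else pvFindB rest (i + 1)
termination_by l _ => l.length
decreasing_by
  · exact Nat.lt_succ_of_le (pvSkipStr_len rest (i + 1))
  · simp

def find_stmt_semicolon_alt (s : String) : Int := pvFindB s.toList 0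

-- ===== PRECONDITION & SPEC =====
def Spec_find_stmt_semicolon (s : String) (out : Int) : Prop := out = find_stmt_semicolon_alt s
instance (s : String) (out : Int) : Decidable (Spec_find_stmt_semicolon s out) := by unfold Spec_find_stmt_semicolon; infer_instance

-- ===== CLAIM (what is proved, stated in full; the proofs are below) =====
def Claim_equal_find_stmt_semicolon : Prop := ∀ (s : String), Dom_find_stmt_semicolon s → Spec_find_stmt_semicolon s (find_stmt_semicolon s)

-- ===== LEMMAS AND PROOFS =====
-- key lemma: A in state (false,false) equals B's outer scan, and A in state
-- (true,false) equals B's outer scan resumed after the literal skip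
theorem pvAB : ∀ (n : Nat) (l : List Char), l.length ≤ n → ∀ (i : Int),
    pvFindA l i false false = pvFindB l i ∧
    pvFindA l i true false = pvFindB (pvSkipStr l i).1 (pvSkipStr l i).2 := by
  intro n
  induction n with
  | zero =>
    intro l hl i
    have : l = [] := List.eq_nil_of_length_eq_zero (Nat.le_zero.mp hl)
    subst this
    simp [pvFindA, pvFindB, pvSkipStr]
  | succ n ih =>
    intro l hl i
    match l with
    | [] => simp [pvFindA, pvFindB, pvSkipStr]
    | c :: rest =>
      have hr : rest.length ≤ n := Nat.le_of_succ_le_succ hl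
      constructor
      · -- state (false,false) vs outer scan
        by_cases hq : c = '"'
        · subst hq
          simp only [pvFindA, pvFindB]
          norm_num
          exact (ih rest hr (i + 1)).2
        · by_cases hs : c = ';'
          · subst hs; simp [pvFindA, pvFindB]
          · simp only [pvFindA, pvFindB]
            simp [hq, hs]
            exact (ih rest hr (i + 1)).1
      · -- state (true,false) vs skip-then-scan
        by_cases hq : c = '"'
        · subst hq
          simp only [pvFindA, pvSkipStr]
          norm_num
          exact (ih rest hr (i + 1)).1
        · by_cases hb : c = '\\'
          · subst hb
            simp only [pvFindA, pvSkipStr]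
            norm_num
            match rest with
            | [] => simp [pvFindA, pvSkipStr, pvFindB]
            | d :: rest' =>
              have hr' : rest'.length ≤ n := Nat.le_of_succ_le hr
              simp only [pvFindA, List.tail_cons]
              norm_num
              have := (ih rest' hr' (i + 1 + 1)).2
              simpa [add_assoc, one_add_one_eq_two] using this
          · simp only [pvFindA, pvSkipStr]
            simp [hq, hb]
            exact (ih rest hr (i + 1)).2

-- ===== VERDICT (by name: the statement is the Claim_ definition above) =====
theorem find_stmt_semicolon_spec : Claim_equal_find_stmt_semicolon := by
  intro s _
  unfold Spec_find_stmt_semicolon find_stmt_semicolon find_stmt_semicolon_alt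
  exact (pvAB s.toList.length s.toList (Nat.le_refl _) 0).1
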